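-- pv_equiv track=rewrite | github.com/bhavna-sinha/Group-Assignment-search-algorithm | part1/solver16_v2.py | colwise_max
-- ===== SOURCE A (Python) =====
-- def rows_column_generator(state):
--     desired_state = sorted(state)
--     cordinates = []
--     col_changes = []
--     row_changes = []
--     for i in range(4):
--         for j in range(4):
--             cordinates.append((i,j))
--     for i in range(len(state)):
--         ind = desired_state.index(state[i])
--         cordinates_state = cordinates[i]
--         cordinates_desired_state = cordinates[ind]
--
--         col = cordinates_desired_state[0] - cordinates_state[0]
--         row = cordinates_desired_state[1] - cordinates_state[1]
--
--         if col == 3: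
--             col_changes.append(-1)
--         elif col == -3:
--             col_changes.append(1)
--         elif col == -2 or col == 2:
--             col_changes.append(2)
--         else:
--             col_changes.append(col)
--
--         if row == 3:
--             row_changes.append(-1)
--         elif row == -3:
--             row_changes.append(1)
--         elif row == -2 or row == 2:
--             row_changes.append(2)
--         else:
--             row_changes.append(row)
--
--
--     return row_changes, col_changes
--
-- def colwise_max(state):
--     row_changes, col_changes = rows_column_generator(state)
--
--     row_max = 0
--     col_max = 0
--     for k in range(0, 4):
--         row_max += max(row_changes[k::4])
--         col_max += max(col_changes[k::4])
--
--     return row_max, col_max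
-- ===== SOURCE B (Python) =====
-- def colwise_max(state):
--     n = len(state)
--     # rank of x = first index of x in sorted(state) = number of elements strictly below x
--     rank = [sum(1 for y in state if y < x) for x in state]
--     row_max = sum(max((rank[i] % 4 - i % 4 + 1) % 4 - 1 for i in range(k, n, 4))
--                   for k in range(4))
--     col_max = sum(max((rank[i] // 4 - i // 4 + 1) % 4 - 1 for i in range(k, n, 4))
--                   for k in range(4))
--     return row_max, col_max
-- ===== Notes on version B (the rewrite author's own statement) =====
-- stated objective: alternative
-- what changed: B computes each tile's target index as the count of strictly smaller elements (no sort, no list.index scan), replaces A's 16-entry coordinate table and if/elif wrap chain by divmod arithmetic with the closed-form clamp ((d+1) % 4) - 1, and sums per-bucket maxima directly over range(k, n, 4) instead of building two change lists and slicing them [k::4].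
import Mathlib
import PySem

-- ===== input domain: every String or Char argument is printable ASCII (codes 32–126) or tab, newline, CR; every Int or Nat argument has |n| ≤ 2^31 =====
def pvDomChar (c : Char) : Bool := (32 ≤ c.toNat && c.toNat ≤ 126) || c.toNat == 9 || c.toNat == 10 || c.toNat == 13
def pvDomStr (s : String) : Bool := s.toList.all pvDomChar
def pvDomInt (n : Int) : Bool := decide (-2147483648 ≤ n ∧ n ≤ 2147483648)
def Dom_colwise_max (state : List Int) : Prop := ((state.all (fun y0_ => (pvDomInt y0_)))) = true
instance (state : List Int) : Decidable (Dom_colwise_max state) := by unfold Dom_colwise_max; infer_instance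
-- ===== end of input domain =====

-- B replaces A's sort + list.index + coordinate table + if/elif wrap chain + slice passes by
-- rank-by-counting (count of strictly smaller elements), divmod arithmetic with the closed-form
-- clamp ((d+1) % 4) - 1, and direct per-bucket maxima over range(k, n, 4); objective: alternative.

-- ===== PORT A =====
-- the 16-entry `cordinates` table A builds with its double loop
def pvCoords : List (Int × Int) :=
  (PySem.List.pyRange 0 4 1).foldl (fun acc i =>
    (PySem.List.pyRange 0 4 1).foldl (fun acc2 j => acc2 ++ [(i, j)]) acc) []

-- A's if/elif clamping chain (written twice in A, identically, for col and row)
def pvClampA (c : Int) : Int :=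
  if c = 3 then -1
  else if c = -3 then 1
  else if c = -2 ∨ c = 2 then 2
  else c

def rows_column_generator (state : List Int) : List Int × List Int :=
  let desired := PySem.List.sorted state (fun x => x) false
  -- `desired_state.index(state[i])` never fails (state[i] ∈ sorted state), so `.getD 0` is never taken;
  -- `cordinates[i]`/`cordinates[ind]` use the total pyGetD: out-of-range (len(state) > 16) is excluded by Pre_.
  (PySem.List.pyRange 0 (state.length : Int) 1).foldl
    (fun (acc : List Int × List Int) i =>
      let ind : Int := ((PySem.List.index? desired (PySem.List.pyGetD state i 0)).getD 0 : Nat)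
      let cs := PySem.List.pyGetD pvCoords i (0, 0)
      let cd := PySem.List.pyGetD pvCoords ind (0, 0)
      let col := cd.1 - cs.1
      let row := cd.2 - cs.2
      (acc.1 ++ [pvClampA row], acc.2 ++ [pvClampA col]))
    ([], [])

def colwise_max (state : List Int) : Int × Int :=
  let rc := rows_column_generator state
  let row_changes := rc.1
  let col_changes := rc.2
  -- `max(row_changes[k::4])` raises on an empty slice (len(state) < 4): excluded by Pre_, so `.getD` defaults are never taken.
  (PySem.List.pyRange 0 4 1).foldl
    (fun (acc : Int × Int) k =>
      (acc.1 + (PySem.List.max? ((PySem.List.slice? row_changes (some k) none 4).getD []) (fun x => x)).getD 0,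
       acc.2 + (PySem.List.max? ((PySem.List.slice? col_changes (some k) none 4).getD []) (fun x => x)).getD 0))
    (0, 0)

-- ===== PORT B =====
def colwise_max_alt (state : List Int) : Int × Int :=
  let n : Int := (state.length : Int)
  -- rank = [sum(1 for y in state if y < x) for x in state]
  let rank : List Int := state.map (fun x => state.foldl (fun acc y => if y < x then acc + 1 else acc) 0)
  -- max() of an empty generator (len(state) < 4) raises ValueError: excluded by Pre_, so `.getD 0` is never taken
  let row_max : Int := (PySem.List.pyRange 0 4 1).foldl (fun acc k =>
    acc + (PySem.List.max? ((PySem.List.pyRange k n 4).map (fun i =>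
      PySem.Int.mod (PySem.Int.mod (PySem.List.pyGetD rank i 0) 4 - PySem.Int.mod i 4 + 1) 4 - 1))
      (fun y => y)).getD 0) 0
  let col_max : Int := (PySem.List.pyRange 0 4 1).foldl (fun acc k =>
    acc + (PySem.List.max? ((PySem.List.pyRange k n 4).map (fun i =>
      PySem.Int.mod (PySem.Int.floordiv (PySem.List.pyGetD rank i 0) 4 - PySem.Int.floordiv i 4 + 1) 4 - 1))
      (fun y => y)).getD 0) 0
  (row_max, col_max)

-- ===== PRECONDITION & SPEC =====
-- Pre_ is exactly where Python A returns: with fewer than 4 elements `max` of an empty slice raises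
-- ValueError, with more than 16 the `cordinates[...]` lookup raises IndexError.
def Pre_colwise_max (state : List Int) : Prop := 4 ≤ state.length ∧ state.length ≤ 16
instance (state : List Int) : Decidable (Pre_colwise_max state) := by unfold Pre_colwise_max; infer_instance
def pvWitness_colwise_max : List Int := [3, 1, 2, 0]

def Spec_colwise_max (state : List Int) (out : Int × Int) : Prop := out = colwise_max_alt state
instance (state : List Int) (out : Int × Int) : Decidable (Spec_colwise_max state out) := by unfold Spec_colwise_max; infer_instance

-- ===== CLAIM (what is proved, stated in full; the proofs are below) =====
def Claim_equal_colwise_max : Prop := ∀ (state : List Int), Dom_colwise_max state → Pre_colwise_max state → Spec_colwise_max state (colwise_max state)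

-- ===== LEMMAS AND PROOFS =====

-- the index A computes: first position of state[i] in sorted(state)
def pvInd (state : List Int) (i : Int) : Int :=
  ((PySem.List.index? (PySem.List.sorted state (fun x => x) false) (PySem.List.pyGetD state i 0)).getD 0 : Nat)

-- A's per-position row/col change values
def pvR_A (state : List Int) (i : Int) : Int :=
  pvClampA ((PySem.List.pyGetD pvCoords (pvInd state i) (0, 0)).2 - (PySem.List.pyGetD pvCoords i (0, 0)).2)
def pvC_A (state : List Int) (i : Int) : Int :=
  pvClampA ((PySem.List.pyGetD pvCoords (pvInd state i) (0, 0)).1 - (PySem.List.pyGetD pvCoords i (0, 0)).1)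

-- the rank B computes: number of elements strictly below state[i]
def pvRank (state : List Int) (i : Int) : Int :=
  PySem.List.pyGetD (state.map (fun x => state.foldl (fun acc y => if y < x then acc + 1 else acc) 0)) i 0

-- B's per-position row/col values
def pvRowB (state : List Int) (i : Int) : Int :=
  PySem.Int.mod (PySem.Int.mod (pvRank state i) 4 - PySem.Int.mod i 4 + 1) 4 - 1
def pvColB (state : List Int) (i : Int) : Int :=
  PySem.Int.mod (PySem.Int.floordiv (pvRank state i) 4 - PySem.Int.floordiv i 4 + 1) 4 - 1

-- A's second pass, abstracted over the two change lists
def pvAgg (row_changes col_changes : List Int) : Int × Int :=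
  (PySem.List.pyRange 0 4 1).foldl
    (fun (acc : Int × Int) k =>
      (acc.1 + (PySem.List.max? ((PySem.List.slice? row_changes (some k) none 4).getD []) (fun x => x)).getD 0,
       acc.2 + (PySem.List.max? ((PySem.List.slice? col_changes (some k) none 4).getD []) (fun x => x)).getD 0))
    (0, 0)

-- Python max of a nonempty Int list as a running-max fold
def pvM (l : List Int) : Int :=
  match l with
  | [] => 0
  | x :: t => t.foldl max x

lemma pvMax_getD (l : List Int) :
    (PySem.List.max? l (fun y => y)).getD 0 = pvM l := by
  cases l with
  | nil => rfl
  | cons x t => rw [PySem.List.max?_id_cons]; rfl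

lemma pvCoords_get (i : Int) (h0 : 0 ≤ i) (h1 : i < 16) :
    PySem.List.pyGetD pvCoords i (0, 0) = (PySem.Int.floordiv i 4, PySem.Int.mod i 4) := by
  interval_cases i <;> decide

lemma pvClamp_mod (d : Int) (h0 : -4 < d) (h1 : d < 4) :
    pvClampA d = PySem.Int.mod (d + 1) 4 - 1 := by
  interval_cases d <;> decide

lemma pvInd_bounds (state : List Int) (i : Int) (h0 : 0 ≤ i) (hn : i < state.length) :
    0 ≤ pvInd state i ∧ pvInd state i < state.length := by
  have hv : PySem.List.pyGetD state i 0 ∈ state :=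
    PySem.List.pyGetD_mem state 0 (by constructor <;> omega)
  have hv' : PySem.List.pyGetD state i 0 ∈ PySem.List.sorted state (fun x => x) false :=
    (PySem.List.mem_sorted state (fun x => x) false _).2 hv
  obtain ⟨k, hk⟩ := Option.isSome_iff_exists.1
    ((PySem.List.index?_isSome_iff _ _).2 hv')
  obtain ⟨hklt, -, -⟩ := PySem.List.getElem_of_index?_eq_some hk
  rw [PySem.List.length_sorted] at hklt
  unfold pvInd
  rw [hk]
  simp only [Option.getD_some]
  omega

-- first index of x in a ≤-sorted list = number of elements strictly below x
lemma pvIdx_sorted (L : List Int) (x : Int) (hp : L.Pairwise (fun a b => a ≤ b)) (hx : x ∈ L) :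
    PySem.List.index? L x = some (L.countP (fun y => decide (y < x))) := by
  induction L with
  | nil => cases hx
  | cons a t ih =>
    rcases List.pairwise_cons.1 hp with ⟨ha, hpt⟩
    by_cases hax : a = x
    · subst hax
      rw [PySem.List.index?_cons_self]
      have h1 : (a :: t).countP (fun y => decide (y < a)) = 0 := by
        rw [List.countP_eq_zero]
        intro y hy
        rcases List.mem_cons.1 hy with rfl | hy
        · simp
        · have := ha y hy
          simp only [decide_eq_true_eq]
          omega
      rw [h1]
    · have hxt : x ∈ t := by
        rcases List.mem_cons.1 hx with h | h
        · exact absurd h.symm hax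
        · exact h
      rw [PySem.List.index?_cons_of_ne _ hax, ih hpt hxt]
      have hax' : a < x := lt_of_le_of_ne (ha x hxt) hax
      simp [hax', Nat.add_comm]

-- B's rank equals A's sorted-index, pointwise
lemma pvRank_eq (state : List Int) (i : Int) (h0 : 0 ≤ i) (hn : i < state.length) :
    pvRank state i = pvInd state i := by
  have hIt : i.toNat < state.length := by omega
  have hx : PySem.List.pyGetD state i 0 = state[i.toNat]'hIt :=
    PySem.List.pyGetD_eq_getElem state 0 h0 (by omega)
  have hv : PySem.List.pyGetD state i 0 ∈ state :=
    PySem.List.pyGetD_mem state 0 (by constructor <;> omega)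
  have hv' : PySem.List.pyGetD state i 0 ∈ PySem.List.sorted state (fun x => x) false :=
    (PySem.List.mem_sorted state (fun x => x) false _).2 hv
  unfold pvRank pvInd
  rw [PySem.List.pyGetD_of_nonneg _ 0 h0,
    List.getD_eq_getElem _ _ (by simpa using hIt), List.getElem_map,
    PySem.List.foldl_ite_add_one,
    pvIdx_sorted _ _ (PySem.List.sorted_pairwise state (fun x => x)) hv',
    (PySem.List.sorted_perm state (fun x => x) false).countP_eq, hx]
  simp

lemma pvPoint_row (state : List Int) (h16 : state.length ≤ 16) (i : Int)
    (h0 : 0 ≤ i) (hn : i < state.length) : pvR_A state i = pvRowB state i := by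
  obtain ⟨hi0, hiLt⟩ := pvInd_bounds state i h0 hn
  unfold pvR_A pvRowB
  rw [pvRank_eq state i h0 hn,
    pvCoords_get i h0 (by omega), pvCoords_get (pvInd state i) hi0 (by omega)]
  have m1 := PySem.Int.mod_nonneg (pvInd state i) (b := 4) (by omega)
  have m2 := PySem.Int.mod_lt (pvInd state i) (b := 4) (by omega)
  have m3 := PySem.Int.mod_nonneg i (b := 4) (by omega)
  have m4 := PySem.Int.mod_lt i (b := 4) (by omega)
  exact pvClamp_mod _ (by omega) (by omega)

lemma pvPoint_col (state : List Int) (h16 : state.length ≤ 16) (i : Int)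
    (h0 : 0 ≤ i) (hn : i < state.length) : pvC_A state i = pvColB state i := by
  obtain ⟨hi0, hiLt⟩ := pvInd_bounds state i h0 hn
  unfold pvC_A pvColB
  rw [pvRank_eq state i h0 hn,
    pvCoords_get i h0 (by omega), pvCoords_get (pvInd state i) hi0 (by omega)]
  have d1 : (0 : Int) ≤ PySem.Int.floordiv (pvInd state i) 4 :=
    (PySem.Int.le_floordiv_iff_mul_le (by omega)).2 (by omega)
  have d2 : PySem.Int.floordiv (pvInd state i) 4 < 4 :=
    (PySem.Int.floordiv_lt_iff_lt_mul (by omega)).2 (by omega)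
  have d3 : (0 : Int) ≤ PySem.Int.floordiv i 4 :=
    (PySem.Int.le_floordiv_iff_mul_le (by omega)).2 (by omega)
  have d4 : PySem.Int.floordiv i 4 < 4 :=
    (PySem.Int.floordiv_lt_iff_lt_mul (by omega)).2 (by omega)
  exact pvClamp_mod _ (by omega) (by omega)

-- A's generator builds exactly the per-position maps
lemma pvGen_eq (state : List Int) :
    rows_column_generator state =
      ((PySem.List.pyRange 0 (state.length : Int) 1).map (pvR_A state),
       (PySem.List.pyRange 0 (state.length : Int) 1).map (pvC_A state)) := by
  have h : rows_column_generator state =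
      (PySem.List.pyRange 0 (state.length : Int) 1).foldl
        (fun (acc : List Int × List Int) i => (acc.1 ++ [pvR_A state i], acc.2 ++ [pvC_A state i]))
        ([], []) := rfl
  rw [h, PySem.List.foldl_prod_mk (fun l i => l ++ [pvR_A state i]) (fun l i => l ++ [pvC_A state i]),
    PySem.List.foldl_append_singleton_eq_map, PySem.List.foldl_append_singleton_eq_map]
  simp

-- A's [c::4] slice of the mapped range IS the map over the step-4 range
lemma pvSlice4 (f : Int → Int) (c : Int) (n : Nat) (hc0 : 0 ≤ c) (hcn : c ≤ (n : Int)) :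
    (PySem.List.slice? ((PySem.List.pyRange 0 (n : Int) 1).map f) (some c) none 4).getD []
      = (PySem.List.pyRange c (n : Int) 4).map f := by
  have hlen : ((PySem.List.pyRange 0 (n : Int) 1).map f).length = n := by
    rw [List.length_map, PySem.List.length_pyRange_one]
    omega
  unfold PySem.List.slice? PySem.List.sliceIndices
  rw [hlen]
  simp only [show ¬ ((4 : Int) = 0) by norm_num, if_false,
    show ¬ ((4 : Int) < 0) by norm_num, if_false,
    show ¬ (c < 0) by omega, if_false]
  rw [min_eq_left hcn]
  simp only [show ((0 : Int) < 4) = True by simp, if_true, Option.getD_some]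
  rw [PySem.List.pyRange_of_pos _ _ (show (0:Int) < 4 by norm_num), List.map_map]
  have hcount : ∀ t ∈ List.range (if c < (n : Int) then (((n : Int) - c + 4 - 1) / 4).toNat else 0),
      ((PySem.List.pyRange 0 (n : Int) 1).map f)[(c + 4 * (t : Int)).toNat]?
        = some ((fun k => f (c + 4 * (k : Int))) t) := by
    intro t ht
    rw [List.mem_range] at ht
    by_cases hlt : c < (n : Int)
    · rw [if_pos hlt] at ht
      have hidx : c + 4 * (t : Int) < n := by
        have := Int.toNat_of_nonneg (show (0:Int) ≤ ((n : Int) - c + 4 - 1) / 4 by omega)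
        omega
      have hidx0 : (0 : Int) ≤ c + 4 * (t : Int) := by omega
      have hnat : (c + 4 * (t : Int)).toNat < n := by omega
      have hcast : ((c + 4 * (t : Int)).toNat : Int) = c + 4 * (t : Int) :=
        Int.toNat_of_nonneg hidx0
      rw [PySem.List.getElem?_map_pyRange_zero f n _ hnat, hcast]
    · rw [if_neg hlt] at ht
      omega
  rw [List.filterMap_congr hcount,
    show (fun (t : Nat) => some ((fun k => f (c + 4 * k)) (t : Int)))
      = some ∘ (fun (t : Nat) => f (c + 4 * (t : Int))) from rfl,
    List.filterMap_eq_map]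
  rfl

-- A's aggregation over the mapped range, written with pvM on step-4 ranges
lemma pvAgg_eq (f g : Int → Int) (n : Nat) (h4 : 4 ≤ n) :
    pvAgg ((PySem.List.pyRange 0 (n : Int) 1).map f) ((PySem.List.pyRange 0 (n : Int) 1).map g)
      = (0 + pvM ((PySem.List.pyRange 0 (n : Int) 4).map f)
            + pvM ((PySem.List.pyRange 1 (n : Int) 4).map f)
            + pvM ((PySem.List.pyRange 2 (n : Int) 4).map f)
            + pvM ((PySem.List.pyRange 3 (n : Int) 4).map f),
         0 + pvM ((PySem.List.pyRange 0 (n : Int) 4).map g)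
            + pvM ((PySem.List.pyRange 1 (n : Int) 4).map g)
            + pvM ((PySem.List.pyRange 2 (n : Int) 4).map g)
            + pvM ((PySem.List.pyRange 3 (n : Int) 4).map g)) := by
  unfold pvAgg
  rw [show PySem.List.pyRange 0 4 1 = [0, 1, 2, 3] from rfl]
  simp only [List.foldl_cons, List.foldl_nil]
  rw [pvSlice4 f 0 n (by omega) (by omega), pvSlice4 f 1 n (by omega) (by omega),
    pvSlice4 f 2 n (by omega) (by omega), pvSlice4 f 3 n (by omega) (by omega),
    pvSlice4 g 0 n (by omega) (by omega), pvSlice4 g 1 n (by omega) (by omega),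
    pvSlice4 g 2 n (by omega) (by omega), pvSlice4 g 3 n (by omega) (by omega)]
  simp only [pvMax_getD]

-- B's result written with pvM on step-4 ranges
lemma pvAlt_eq (state : List Int) :
    colwise_max_alt state
      = (0 + pvM ((PySem.List.pyRange 0 (state.length : Int) 4).map (pvRowB state))
            + pvM ((PySem.List.pyRange 1 (state.length : Int) 4).map (pvRowB state))
            + pvM ((PySem.List.pyRange 2 (state.length : Int) 4).map (pvRowB state))
            + pvM ((PySem.List.pyRange 3 (state.length : Int) 4).map (pvRowB state)),
         0 + pvM ((PySem.List.pyRange 0 (state.length : Int) 4).map (pvColB state))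
            + pvM ((PySem.List.pyRange 1 (state.length : Int) 4).map (pvColB state))
            + pvM ((PySem.List.pyRange 2 (state.length : Int) 4).map (pvColB state))
            + pvM ((PySem.List.pyRange 3 (state.length : Int) 4).map (pvColB state))) := by
  have h : colwise_max_alt state
      = ((PySem.List.pyRange 0 4 1).foldl (fun acc k =>
           acc + (PySem.List.max? ((PySem.List.pyRange k (state.length : Int) 4).map (pvRowB state)) (fun y => y)).getD 0) 0,
         (PySem.List.pyRange 0 4 1).foldl (fun acc k =>
           acc + (PySem.List.max? ((PySem.List.pyRange k (state.length : Int) 4).map (pvColB state)) (fun y => y)).getD 0) 0) := rfl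
  rw [h, show PySem.List.pyRange 0 4 1 = [0, 1, 2, 3] from rfl]
  simp only [List.foldl_cons, List.foldl_nil, pvMax_getD]

-- the per-bucket maps coincide pointwise
lemma pvMapRow (state : List Int) (h16 : state.length ≤ 16) (k : Int) (hk : 0 ≤ k) :
    (PySem.List.pyRange k (state.length : Int) 4).map (pvR_A state)
      = (PySem.List.pyRange k (state.length : Int) 4).map (pvRowB state) :=
  List.map_congr_left (fun i hi => by
    obtain ⟨h1, h2, -⟩ := (PySem.List.mem_pyRange_iff_of_pos (by norm_num) i).1 hi
    exact pvPoint_row state h16 i (by omega) h2)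

lemma pvMapCol (state : List Int) (h16 : state.length ≤ 16) (k : Int) (hk : 0 ≤ k) :
    (PySem.List.pyRange k (state.length : Int) 4).map (pvC_A state)
      = (PySem.List.pyRange k (state.length : Int) 4).map (pvColB state) :=
  List.map_congr_left (fun i hi => by
    obtain ⟨h1, h2, -⟩ := (PySem.List.mem_pyRange_iff_of_pos (by norm_num) i).1 hi
    exact pvPoint_col state h16 i (by omega) h2)

-- ===== VERDICT (by name: the statement is the Claim_ definition above) =====
theorem colwise_max_spec : Claim_equal_colwise_max := by
  intro state _ hpre
  obtain ⟨h4, h16⟩ := hpre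
  show colwise_max state = colwise_max_alt state
  have hA : colwise_max state =
      pvAgg (rows_column_generator state).1 (rows_column_generator state).2 := rfl
  rw [hA, pvGen_eq, pvAlt_eq, pvAgg_eq (pvR_A state) (pvC_A state) state.length h4,
    pvMapRow state h16 0 (by omega), pvMapRow state h16 1 (by omega),
    pvMapRow state h16 2 (by omega), pvMapRow state h16 3 (by omega),
    pvMapCol state h16 0 (by omega), pvMapCol state h16 1 (by omega),
    pvMapCol state h16 2 (by omega), pvMapCol state h16 3 (by omega)]
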